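-- pv_equiv track=rewrite | github.com/jamiegrain/AoC2023 | day1.py | get_last_num
-- ===== SOURCE A (Python) =====
-- num_strings = {
--     "one": 1,
--     "two": 2,
--     "three": 3,
--     "four": 4,
--     "five": 5,
--     "six": 6,
--     "seven": 7,
--     "eight": 8,
--     "nine": 9
--     }
--
-- def get_last_num(line: str):
--     possible_num_string = ""
--     for char in line[::-1]:
--         if char.isnumeric():
--             return char
--         else:
--             possible_num_string = char + possible_num_string
--             possible_num = string_contains_num(possible_num_string)
--             if possible_num:
--                 return possible_num
--
-- def string_contains_num(s: str) -> str:
--     for num_string, num in num_strings.items():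
--         if num_string in s:
--             return str(num)
--     return ''
-- ===== SOURCE B (Python) =====
-- num_strings = {
--     "one": 1,
--     "two": 2,
--     "three": 3,
--     "four": 4,
--     "five": 5,
--     "six": 6,
--     "seven": 7,
--     "eight": 8,
--     "nine": 9
--     }
--
-- def get_last_num(line: str):
--     # Single forward scan: at each index keep the token found there (a digit
--     # char, or the number-word starting exactly there); the last one wins.
--     result = None
--     for i, ch in enumerate(line):
--         if ch.isdigit():
--             result = ch
--         else:
--             for word, num in num_strings.items():
--                 if line[i:i + len(word)] == word:
--                     result = str(num)
--                     break
--     return result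
-- ===== Notes on version B (the rewrite author's own statement) =====
-- stated objective: faster
-- what changed: A scans right-to-left building a growing suffix string and substring-searches the nine words in it at every step with early return; B makes one forward pass over the indices, testing each word by a constant-size positional slice comparison (no accumulator, no substring search) and keeping the last token found.
import Mathlib
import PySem

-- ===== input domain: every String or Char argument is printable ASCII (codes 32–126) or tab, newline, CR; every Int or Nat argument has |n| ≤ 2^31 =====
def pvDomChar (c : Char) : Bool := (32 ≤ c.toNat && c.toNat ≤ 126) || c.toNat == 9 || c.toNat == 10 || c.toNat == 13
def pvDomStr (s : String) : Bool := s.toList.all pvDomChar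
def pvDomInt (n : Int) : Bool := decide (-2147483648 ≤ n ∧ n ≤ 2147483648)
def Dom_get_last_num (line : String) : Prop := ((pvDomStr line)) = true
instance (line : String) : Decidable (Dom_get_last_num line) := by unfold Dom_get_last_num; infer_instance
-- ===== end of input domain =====

-- B replaces A's right-to-left scan, which substring-searches the nine words in a growing
-- suffix at every step (quadratic), by one forward pass doing constant-size positional
-- slice comparisons per index and keeping the last token found (measured faster).

-- ===== PORT A =====
-- the module constant num_strings (dict str -> int, insertion order)
def numStrings : List (String × Int) :=
  [("one", 1), ("two", 2), ("three", 3), ("four", 4), ("five", 5),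
   ("six", 6), ("seven", 7), ("eight", 8), ("nine", 9)]

-- helper string_contains_num: first word contained in s (dict order), else ''
def scnLoop (s : List Char) : List (String × Int) → String
  | [] => ""
  | (w, n) :: rest =>
      if PySem.Chars.isIn w.toList s then PySem.Int.toStr n else scnLoop s rest

def string_contains_num (s : List Char) : String := scnLoop s numStrings

-- the 'for char in line[::-1]' loop: remaining reversed chars, accumulator possible_num_string
def glnLoop : List Char → List Char → Option String
  | [], _ => none
  | c :: rest, acc =>
      -- char.isnumeric(): on the printable-ASCII domain this is exactly isdigit
      if PySem.Chars.isdigit c then some (String.ofList [c])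
      else
        let acc' := c :: acc
        let p := string_contains_num acc'
        if p ≠ "" then some p else glnLoop rest acc'

def get_last_num (line : String) : Option String :=
  -- line[::-1] is the reverse of the code points (PySem.List.slice?_none_none_neg_one)
  glnLoop line.toList.reverse []

-- ===== PORT B =====
-- inner 'for word, num in num_strings.items(): if line[i:i+len(word)] == word: … break'
def wordAtLoop (cs : List Char) (i : Int) : List (String × Int) → Option String
  | [] => none
  | (w, n) :: rest =>
      if PySem.List.slice cs (some i) (some (i + PySem.Str.len w)) = w.toList
      then some (PySem.Int.toStr n) else wordAtLoop cs i rest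

def get_last_num_alt (line : String) : Option String :=
  (PySem.List.enumerate line.toList 0).foldl
    (fun result p =>
      if PySem.Chars.isdigit p.2 then some (String.ofList [p.2])
      else
        match wordAtLoop line.toList p.1 numStrings with
        | some v => some v
        | none => result)
    none

-- ===== PRECONDITION & SPEC =====
def Spec_get_last_num (line : String) (out : Option String) : Prop := out = get_last_num_alt line
instance (line : String) (out : Option String) : Decidable (Spec_get_last_num line out) := by unfold Spec_get_last_num; infer_instance

-- ===== CLAIM (what is proved, stated in full; the proofs are below) =====
def Claim_equal_get_last_num : Prop := ∀ (line : String), Dom_get_last_num line → Spec_get_last_num line (get_last_num line)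

-- ===== LEMMAS AND PROOFS =====

-- the token starting at index j: a digit char, or the first number-word that is a prefix of cs.drop j
def wordPrefAt (cs : List Char) (j : Nat) : Option String :=
  (numStrings.find? (fun p => p.1.toList.isPrefixOf (cs.drop j))).map (fun p => PySem.Int.toStr p.2)

def tokAt (cs : List Char) (j : Nat) : Option String :=
  match cs[j]? with
  | none => none
  | some c => if PySem.Chars.isdigit c then some (String.ofList [c]) else wordPrefAt cs j

-- rightmost token among indices < j
def rtok (cs : List Char) : Nat → Option String
  | 0 => none
  | j + 1 => ((tokAt cs j).orElse (fun _ => rtok cs j))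

-- facts about the nine literal (word, value) pairs
theorem numStrings_fact :
    ∀ p ∈ numStrings, PySem.Int.toStr p.2 ≠ "" ∧ p.1.toList ≠ [] ∧
      PySem.Chars.isdigit (p.1.toList.headD 'x') = false := by decide

-- B's inner word loop is find? over the prefix predicate
theorem wordAtLoop_eq (cs : List Char) (j : Nat) (L : List (String × Int)) :
    wordAtLoop cs (j : Int) L
      = (L.find? (fun p => p.1.toList.isPrefixOf (cs.drop j))).map (fun p => PySem.Int.toStr p.2) := by
  induction L with
  | nil => rfl
  | cons hd tl ih =>
      obtain ⟨w, n⟩ := hd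
      have hsl : PySem.List.slice cs (some (j : Int)) (some ((j : Int) + PySem.Str.len w))
          = (cs.drop j).take w.toList.length := by
        rw [PySem.Str.len_eq, PySem.List.slice_natCast_add]
      have hstep : wordAtLoop cs (j : Int) ((w, n) :: tl)
          = if PySem.List.slice cs (some (j : Int)) (some ((j : Int) + PySem.Str.len w)) = w.toList
            then some (PySem.Int.toStr n) else wordAtLoop cs (j : Int) tl := rfl
      rw [hstep, hsl]
      by_cases hp : w.toList <+: cs.drop j
      · have hpb : w.toList.isPrefixOf (cs.drop j) = true := List.isPrefixOf_iff_prefix.mpr hp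
        have heq : (cs.drop j).take w.length = w.toList := by
          simpa using (List.prefix_iff_eq_take.mp hp).symm
        simp [heq, List.find?, hpb]
      · have hpb : w.toList.isPrefixOf (cs.drop j) = false := by
          cases hb : w.toList.isPrefixOf (cs.drop j)
          · rfl
          · exact absurd (List.isPrefixOf_iff_prefix.mp hb) hp
        have hne : (cs.drop j).take w.length ≠ w.toList := by
          intro h
          exact hp (List.prefix_iff_eq_take.mpr (by simpa using h.symm))
        simp [hne, List.find?, hpb, ih]

-- A's string_contains_num loop is the same find?, given containment ↔ prefix for each word
theorem scnLoop_eq (d : List Char) (L : List (String × Int))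
    (h : ∀ p ∈ L, (PySem.Chars.isIn p.1.toList d = true ↔ p.1.toList <+: d)) :
    scnLoop d L
      = (((L.find? (fun p => p.1.toList.isPrefixOf d)).map (fun p => PySem.Int.toStr p.2)).getD "") := by
  induction L with
  | nil => rfl
  | cons hd tl ih =>
      obtain ⟨w, n⟩ := hd
      have hw := h (w, n) (List.mem_cons_self ..)
      by_cases hp : w.toList <+: d
      · have hpb : w.toList.isPrefixOf d = true := List.isPrefixOf_iff_prefix.mpr hp
        simp [scnLoop, hw.mpr hp, List.find?, hpb]
      · have hpb : w.toList.isPrefixOf d = false := by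
          cases hb : w.toList.isPrefixOf d
          · rfl
          · exact absurd (List.isPrefixOf_iff_prefix.mp hb) hp
        have hin : PySem.Chars.isIn w.toList d = false := by
          cases hb : PySem.Chars.isIn w.toList d
          · rfl
          · exact absurd (hw.mp hb) hp
        simp only [scnLoop, hin, Bool.false_eq_true, if_false]
        rw [ih (fun p hp' => h p (List.mem_cons_of_mem _ hp'))]
        simp [List.find?, hpb]

-- under "no token strictly to the right of j", containment in the suffix is prefix at j
theorem isIn_iff_prefix_at (cs : List Char) (j : Nat)
    (H : ∀ k, j < k → k < cs.length → tokAt cs k = none) :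
    ∀ p ∈ numStrings, (PySem.Chars.isIn p.1.toList (cs.drop j) = true ↔ p.1.toList <+: cs.drop j) := by
  intro p hp
  obtain ⟨-, hne, hhd⟩ := numStrings_fact p hp
  constructor
  · intro hin
    obtain ⟨j', hpre⟩ := (PySem.Chars.exists_prefix_drop_iff_isIn p.1.toList (cs.drop j)).mpr hin
    rw [List.drop_drop] at hpre
    rcases Nat.eq_zero_or_pos j' with hz | hposj
    · simpa [hz] using hpre
    · exfalso
      obtain ⟨c, t, hw⟩ : ∃ c t, p.1.toList = c :: t := by
        cases hwl : p.1.toList with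
        | nil => exact absurd hwl hne
        | cons a b => exact ⟨a, b, rfl⟩
      obtain ⟨t', ht'⟩ := hpre
      have hget : cs[j + j']? = some c := by
        have h0 : (cs.drop (j + j'))[0]? = some c := by
          rw [← ht', hw]; rfl
        rw [List.getElem?_drop] at h0
        simpa using h0
      have hlt : j + j' < cs.length := (List.getElem?_eq_some_iff.mp hget).choose
      have htok := H (j + j') (by omega) hlt
      have hcd : PySem.Chars.isdigit c = false := by
        have := hhd; rwa [hw] at this
      rw [tokAt, hget] at htok
      simp only [hcd, Bool.false_eq_true, if_false] at htok
      rw [wordPrefAt, Option.map_eq_none_iff, List.find?_eq_none] at htok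
      exact htok p hp (by rw [List.isPrefixOf_iff_prefix]; exact ⟨t', ht'⟩)
  · intro hp'
    exact (PySem.Chars.isIn_iff_infix _ _).mpr hp'.isInfix

-- A's loop computes the rightmost token
theorem glnLoop_eq (cs : List Char) (j : Nat) (hj : j ≤ cs.length)
    (H : ∀ k, j ≤ k → k < cs.length → tokAt cs k = none) :
    glnLoop ((cs.take j).reverse) (cs.drop j) = rtok cs j := by
  induction j with
  | zero => simp [glnLoop, rtok]
  | succ j ih =>
      have hjlt : j < cs.length := by omega
      have htake : (cs.take (j + 1)).reverse = cs[j] :: (cs.take j).reverse := by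
        rw [List.take_add_one, List.getElem?_eq_getElem hjlt]
        simp
      have hdrop : cs[j] :: cs.drop (j + 1) = cs.drop j := List.getElem_cons_drop hjlt
      have hget : cs[j]? = some cs[j] := List.getElem?_eq_getElem hjlt
      rw [htake]
      by_cases hd : PySem.Chars.isdigit cs[j] = true
      · simp [glnLoop, hd, rtok, tokAt, hget, Option.orElse]
      · have hd' : PySem.Chars.isdigit cs[j] = false := by
          cases hb : PySem.Chars.isdigit cs[j]
          · rfl
          · exact absurd hb hd
        have hiff := isIn_iff_prefix_at cs j (fun k hk1 hk2 => H k (by omega) hk2)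
        have hscn : string_contains_num (cs.drop j)
            = ((wordPrefAt cs j).getD "") := by
          rw [string_contains_num, scnLoop_eq _ _ hiff, wordPrefAt]
        cases hwp : wordPrefAt cs j with
        | some v =>
            have hvne : v ≠ "" := by
              rw [wordPrefAt] at hwp
              obtain ⟨q, hq1, hq2⟩ := Option.map_eq_some_iff.mp hwp
              rw [← hq2]
              exact (numStrings_fact q (List.mem_of_find?_eq_some hq1)).1
            simp only [glnLoop, hd', Bool.false_eq_true, if_false]
            rw [hdrop, hscn, hwp]
            simp [hvne, rtok, tokAt, hget, hd', hwp, Option.orElse]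
        | none =>
            have htokj : tokAt cs j = none := by
              rw [tokAt, hget]; simp [hd', hwp]
            simp only [glnLoop, hd', Bool.false_eq_true, if_false]
            rw [hdrop, hscn, hwp]
            simp only [Option.getD_none, ne_eq, not_true_eq_false, if_false]
            rw [ih (by omega) (fun k hk1 hk2 => by
              rcases Nat.eq_or_lt_of_le hk1 with he | hl
              · rw [← he]; exact htokj
              · exact H k (by omega) hk2)]
            simp [rtok, htokj, Option.orElse]

-- B's fold computes the rightmost token
theorem bFold_eq (cs : List Char) (j : Nat) (hj : j ≤ cs.length) :
    (PySem.List.enumerate (cs.take j) 0).foldl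
      (fun result p =>
        if PySem.Chars.isdigit p.2 then some (String.ofList [p.2])
        else
          match wordAtLoop cs p.1 numStrings with
          | some v => some v
          | none => result)
      none = rtok cs j := by
  induction j with
  | zero => simp [rtok]
  | succ j ih =>
      have hjlt : j < cs.length := by omega
      have htake : cs.take (j + 1) = cs.take j ++ [cs[j]] := by
        rw [List.take_add_one, List.getElem?_eq_getElem hjlt]
        rfl
      have hlen : (cs.take j).length = j := List.length_take_of_le (by omega)
      rw [htake, PySem.List.enumerate_append, List.foldl_append, hlen,
        ih (by omega)]
      have hget : cs[j]? = some cs[j] := List.getElem?_eq_getElem hjlt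
      simp only [PySem.List.enumerate_cons, PySem.List.enumerate_nil, List.foldl_cons, List.foldl_nil, zero_add]
      rw [wordAtLoop_eq cs j numStrings]
      by_cases hd : PySem.Chars.isdigit cs[j] = true
      · simp [hd, rtok, tokAt, hget, Option.orElse]
      · have hd' : PySem.Chars.isdigit cs[j] = false := by
          cases hb : PySem.Chars.isdigit cs[j]
          · rfl
          · exact absurd hb hd
        cases hwp : wordPrefAt cs j with
        | some v =>
            rw [wordPrefAt] at hwp
            simp [hd', hwp, rtok, tokAt, hget, wordPrefAt, Option.orElse]
        | none =>
            rw [wordPrefAt] at hwp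
            simp [hd', hwp, rtok, tokAt, hget, wordPrefAt, Option.orElse]

-- ===== VERDICT (by name: the statement is the Claim_ definition above) =====
theorem get_last_num_spec : Claim_equal_get_last_num := by
  intro line _
  unfold Spec_get_last_num get_last_num get_last_num_alt
  have hA := glnLoop_eq line.toList line.toList.length le_rfl
    (fun k hk1 hk2 => absurd hk2 (by omega))
  rw [List.take_length, List.drop_length] at hA
  have hB := bFold_eq line.toList line.toList.length le_rfl
  rw [List.take_length] at hB
  rw [hA, ← hB]
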